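-- pv_equiv track=rewrite | github.com/lnStarmark/Recursion_tutorial | main.py | Fn
-- ===== SOURCE A (Python) =====
-- def Fn(arg, op: str):
--     if (arg == []):
--         return 0
--     else:
--         res = Fn(arg[1:], op)
--         if (op == "+"):
--             res = res + arg[0]
--         elif (op == "-"):
--             res = res - arg[0]
--         elif (op == "*"):
--             res = res * arg[0]
--
--         return res
-- ===== SOURCE B (Python) =====
-- def Fn(arg, op: str):
--     if op == "+":
--         return sum(arg)
--     if op == "-":
--         return -sum(arg)
--     return 0
-- ===== Notes on version B (the rewrite author's own statement) =====
-- stated objective: faster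
-- what changed: Replaced the O(n^2) recursion (each call slices arg[1:]) with a single closed-form dispatch on op: sum for '+', negated sum for '-', and 0 otherwise (for '*' the recursion's base case 0 makes every product 0).
import Mathlib
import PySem

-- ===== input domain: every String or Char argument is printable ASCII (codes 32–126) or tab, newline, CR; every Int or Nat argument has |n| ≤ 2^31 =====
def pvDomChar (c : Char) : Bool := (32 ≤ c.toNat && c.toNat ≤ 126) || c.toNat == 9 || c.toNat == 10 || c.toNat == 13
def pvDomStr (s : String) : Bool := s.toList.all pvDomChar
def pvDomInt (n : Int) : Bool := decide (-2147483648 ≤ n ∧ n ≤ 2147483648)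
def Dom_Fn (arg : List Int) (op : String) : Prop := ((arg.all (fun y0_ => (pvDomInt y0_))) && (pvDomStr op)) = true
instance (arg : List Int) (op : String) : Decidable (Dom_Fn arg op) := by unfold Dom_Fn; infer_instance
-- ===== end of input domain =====

-- B replaces A's quadratic slicing recursion with a single dispatch on op over one sum (faster, asymptotic).

-- ===== PORT A =====
def Fn (arg : List Int) (op : String) : Int :=
  match arg with
  | [] => 0
  | a0 :: rest =>                       -- arg[1:] on a nonempty list is its tail
    let res := Fn rest op
    if op == "+" then res + a0
    else if op == "-" then res - a0
    else if op == "*" then res * a0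
    else res

-- ===== PORT B =====
def Fn_alt (arg : List Int) (op : String) : Int :=
  if op == "+" then arg.sum
  else if op == "-" then -arg.sum
  else 0

-- ===== PRECONDITION & SPEC =====
def Spec_Fn (arg : List Int) (op : String) (out : Int) : Prop := out = Fn_alt arg op
instance (arg : List Int) (op : String) (out : Int) : Decidable (Spec_Fn arg op out) := by unfold Spec_Fn; infer_instance

-- ===== CLAIM (what is proved, stated in full; the proofs are below) =====
def Claim_equal_Fn : Prop := ∀ (arg : List Int) (op : String), Dom_Fn arg op → Spec_Fn arg op (Fn arg op)

-- ===== LEMMAS AND PROOFS =====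
theorem Fn_plus (arg : List Int) : Fn arg "+" = arg.sum := by
  induction arg with
  | nil => simp [Fn]
  | cons a rest ih => simp [Fn, ih]; ring

theorem Fn_minus (arg : List Int) : Fn arg "-" = -arg.sum := by
  induction arg with
  | nil => simp [Fn]
  | cons a rest ih => simp [Fn, ih]; ring

theorem Fn_zero (arg : List Int) (op : String) (h1 : op ≠ "+") (h2 : op ≠ "-") :
    Fn arg op = 0 := by
  induction arg with
  | nil => simp [Fn]
  | cons a rest ih =>
    simp only [Fn, ih]
    simp [h1, h2]

-- ===== VERDICT (by name: the statement is the Claim_ definition above) =====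
theorem Fn_spec : Claim_equal_Fn := by
  intro arg op _
  unfold Spec_Fn Fn_alt
  by_cases h1 : op = "+"
  · subst h1; simp [Fn_plus]
  · by_cases h2 : op = "-"
    · subst h2; simp [Fn_minus]
    · simp [h1, h2, Fn_zero arg op h1 h2]
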